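-- pv_equiv track=rewrite | github.com/pypi-data/pypi-mirror-156 | packages/matomeru-mi/matomeru_mi-2022.6.22-py3-none-any.whl/matomerumi/matomerumi_lib/mmi_parser.py | save_spacing
-- ===== SOURCE A (Python) =====
-- def save_spacing(line):
--     counter = 0
--     i = 0
--     b_pos = i
--     line = line.rstrip()
--     while i < len(line):
--         if line[i] == ' ':
--             if counter == 0:
--                 b_pos = i
--             counter += 1
--         else:
--             if counter > 1:
--                 line = line[:b_pos] + f'<text:s text:c="{counter}"/>' + line[b_pos + counter:]
--                 i = 0
--             elif counter > 0 and b_pos == 0: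
--                 line = line[:b_pos] + '<text:s/>' + line[b_pos + counter:]
--                 i = 0
--             counter = 0
--         i += 1
--     return line
-- ===== SOURCE B (Python) =====
-- def save_spacing(line):
--     line = line.rstrip()
--     out = []
--     i = 0
--     n = len(line)
--     while i < n:
--         ch = line[i]
--         if ch == ' ':
--             j = i
--             while j < n and line[j] == ' ':
--                 j += 1
--             run = j - i
--             if run > 1:
--                 out.append(f'<text:s text:c="{run}"/>')
--             elif i == 0:
--                 out.append('<text:s/>')
--             else:
--                 out.append(' ')
--             i = j
--         else:
--             out.append(ch)
--             i += 1
--     return ''.join(out)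
-- ===== Notes on version B (the rewrite author's own statement) =====
-- stated objective: alternative
-- what changed: A repeatedly splices a tag into the string and restarts its scan from index 0 after every replacement; B makes one left-to-right pass over the rstripped string, emitting one piece per non-space character or per maximal space run, and joins the pieces once.
import Mathlib
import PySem

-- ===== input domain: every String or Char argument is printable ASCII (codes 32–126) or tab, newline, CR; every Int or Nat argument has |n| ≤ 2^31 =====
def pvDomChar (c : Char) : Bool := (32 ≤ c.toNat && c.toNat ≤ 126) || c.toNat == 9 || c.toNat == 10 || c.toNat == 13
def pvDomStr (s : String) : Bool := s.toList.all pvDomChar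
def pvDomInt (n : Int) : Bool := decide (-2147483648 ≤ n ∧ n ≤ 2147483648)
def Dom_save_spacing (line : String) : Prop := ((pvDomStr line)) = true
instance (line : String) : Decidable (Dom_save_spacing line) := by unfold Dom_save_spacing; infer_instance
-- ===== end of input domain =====

-- B replaces A's restart-the-scan-after-every-splice loop by a single left-to-right pass over
-- the rstripped string that emits one piece per character/space-run; same return value everywhere.

-- ===== PORT A =====
-- f'<text:s text:c="{counter}"/>'
def pvTagA (c : Nat) : List Char :=
  "<text:s text:c=\"".toList ++ PySem.Int.toChars (c : Int) ++ "\"/>".toList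

-- A's while loop, step for step, over the list of characters; the first argument is fuel that
-- only totalises the recursion (pvFuelA below is proved sufficient for every input in the lemmas).
def pvLoopA : Nat → List Char → Nat → Nat → Nat → List Char
  | 0, s, _, _, _ => s
  | fuel + 1, s, i, c, b =>
    if i < s.length then
      if s.getD i ' ' = ' ' then
        -- 'if counter == 0: b_pos = i; counter += 1'
        pvLoopA fuel s (i + 1) (c + 1) (if c = 0 then i else b)
      else if 1 < c then
        -- 'line = line[:b_pos] + f'<text:s text:c="{counter}"/>' + line[b_pos + counter:]; i = 0'
        pvLoopA fuel (s.take b ++ pvTagA c ++ s.drop (b + c)) 1 0 b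
      else if 0 < c ∧ b = 0 then
        pvLoopA fuel (s.take b ++ "<text:s/>".toList ++ s.drop (b + c)) 1 0 b
      else
        pvLoopA fuel s (i + 1) 0 b
    else s

def pvFuelA (s : List Char) : Nat :=
  s.count ' ' * (s.length + 20 + 20 * s.count ' ') + s.length + 1

def save_spacing (line : String) : String :=
  let s := (PySem.Str.rstrip line).toList
  String.mk (pvLoopA (pvFuelA s) s 0 0 0)

-- ===== PORT B =====
-- the inner 'while j < n and line[j] == " ": j += 1'
def pvSkipB (s : List Char) (j : Nat) : Nat :=
  if h : j < s.length ∧ s.getD j ' ' = ' ' then pvSkipB s (j + 1) else j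
  termination_by s.length - j
  decreasing_by omega

theorem pvSkipB_le (s : List Char) : ∀ n j, s.length - j ≤ n → j ≤ pvSkipB s j := by
  intro n
  induction n with
  | zero =>
    intro j hj
    rw [pvSkipB]
    split
    · rename_i h; omega
    · omega
  | succ n ih =>
    intro j hj
    rw [pvSkipB]
    split
    · rename_i h; have := ih (j + 1) (by omega); omega
    · omega

theorem pvSkipB_lt (s : List Char) (i : Nat) (h1 : i < s.length) (h2 : s.getD i ' ' = ' ') :
    i < pvSkipB s i := by
  rw [pvSkipB]
  rw [dif_pos ⟨h1, h2⟩]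
  have := pvSkipB_le s (s.length - (i + 1)) (i + 1) le_rfl
  omega

def pvTagB (n : Nat) : List Char :=
  "<text:s text:c=\"".toList ++ PySem.Int.toChars (n : Int) ++ "\"/>".toList

-- B's single pass: one piece appended per non-space character or per maximal space run.
def pvLoopB (s : List Char) (i : Nat) (out : List Char) : List Char :=
  if hi : i < s.length then
    if hsp : s.getD i ' ' = ' ' then
      -- j = pvSkipB s i; run = j - i
      pvLoopB s (pvSkipB s i)
        (out ++ (if 1 < pvSkipB s i - i then pvTagB (pvSkipB s i - i)
                 else if i = 0 then "<text:s/>".toList else [' ']))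
    else
      pvLoopB s (i + 1) (out ++ [s.getD i ' '])
  else out
  termination_by s.length - i
  decreasing_by
  · have := pvSkipB_lt s i hi hsp; omega
  · omega

def save_spacing_alt (line : String) : String :=
  let s := (PySem.Str.rstrip line).toList
  String.mk (pvLoopB s 0 [])

-- ===== PRECONDITION & SPEC =====
def Spec_save_spacing (line : String) (out : String) : Prop := out = save_spacing_alt line
instance (line : String) (out : String) : Decidable (Spec_save_spacing line out) := by unfold Spec_save_spacing; infer_instance

-- ===== CLAIM (what is proved, stated in full; the proofs are below) =====
def Claim_equal_save_spacing : Prop := ∀ (line : String), Dom_save_spacing line → Spec_save_spacing line (save_spacing line)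

-- ===== LEMMAS AND PROOFS =====

-- the space-run normal form both loops compute, used only in the proofs
def runsB : Bool → List Char → List Char
  | _, [] => []
  | first, ch :: rest =>
    if ch = ' ' then
      (if 0 < (rest.takeWhile (fun c => c = ' ')).length then
         pvTagB ((rest.takeWhile (fun c => c = ' ')).length + 1)
       else if first then "<text:s/>".toList else [' ']) ++
        runsB false (rest.drop (rest.takeWhile (fun c => c = ' ')).length)
    else ch :: runsB false rest
  termination_by _ l => l.length
  decreasing_by
  · simp
  · simp

theorem digitChar_ne_space (k : Nat) (h : k < 10) : Nat.digitChar k ≠ ' ' := by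
  interval_cases k <;> decide

theorem toDigitsCore_mem (b f : Nat) (hb : 2 ≤ b) : ∀ (n : Nat) (ds : List Char) (x : Char),
    x ∈ Nat.toDigitsCore b f n ds → x ∈ ds ∨ ∃ k, k < b ∧ x = Nat.digitChar k := by
  induction f with
  | zero => intro n ds x hx; simp [Nat.toDigitsCore] at hx; exact Or.inl hx
  | succ f ih =>
    intro n ds x hx
    simp only [Nat.toDigitsCore] at hx
    by_cases h : n / b = 0
    · simp [h] at hx
      rcases hx with h1 | h1
      · exact Or.inr ⟨n % b, Nat.mod_lt _ (by omega), h1⟩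
      · exact Or.inl h1
    · simp [h] at hx
      rcases ih (n / b) (Nat.digitChar (n % b) :: ds) x hx with hmem | h1
      · rcases List.mem_cons.mp hmem with h2 | h2
        · exact Or.inr ⟨n % b, Nat.mod_lt _ (by omega), h2⟩
        · exact Or.inl h2
      · exact Or.inr h1

theorem space_not_mem_toDigits (n : Nat) : ' ' ∉ Nat.toDigits 10 n := by
  intro h
  rcases toDigitsCore_mem 10 (n + 1) (by omega) n [] _ h with h1 | ⟨k, hk, h2⟩
  · simp at h1
  · exact digitChar_ne_space k hk h2.symm

theorem toDigits_len_le (n : Nat) (hn : 1 ≤ n) : (Nat.toDigits 10 n).length ≤ n :=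
  Nat.toDigits_length 10 n n hn (Nat.lt_pow_self (by omega))

theorem toChars_nat (n : Nat) : PySem.Int.toChars (n : Int) = Nat.toDigits 10 n := by
  simp [PySem.Int.toChars]

theorem space_not_mem_toChars (n : Nat) : ' ' ∉ PySem.Int.toChars (n : Int) := by
  rw [toChars_nat]; exact space_not_mem_toDigits n

theorem pvTag_count (n : Nat) : (pvTagB n).count ' ' = 1 := by
  rw [pvTagB]
  rw [List.count_append, List.count_append]
  rw [List.count_eq_zero.mpr (space_not_mem_toChars n)]
  decide

theorem pvTag_len_le (n : Nat) (h : 1 ≤ n) : (pvTagB n).length ≤ 19 + n := by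
  rw [pvTagB]
  simp only [List.length_append]
  have h1 : ("<text:s text:c=\"".toList).length = 16 := by decide
  have h2 : ("\"/>".toList).length = 3 := by decide
  have h3 := toDigits_len_le n h
  rw [toChars_nat]
  omega

theorem pvTagA_eq (n : Nat) : pvTagA n = pvTagB n := rfl

theorem chain'_of_not_space (l : List Char) (h : ' ' ∉ l) :
    List.IsChain (fun x y => x = ' ' → y ≠ ' ') l := by
  induction l with
  | nil => exact List.IsChain.nil
  | cons a l ih =>
    rw [List.isChain_cons]
    refine ⟨?_, ih (by simp at h; tauto)⟩
    intro y _ ha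
    exact absurd (ha ▸ List.mem_cons_self) h

theorem getLast?_cons_ne (a : Char) (l : List Char) (h : l ≠ []) :
    (a :: l).getLast? = l.getLast? := by
  cases l with
  | nil => simp at h
  | cons b t => simp [List.getLast?_cons_cons]

theorem pvTag_chain (n : Nat) : List.IsChain (fun x y => x = ' ' → y ≠ ' ') (pvTagB n) := by
  rw [pvTagB, List.append_assoc, List.isChain_append]
  refine ⟨by decide, ?_, ?_⟩
  · rw [List.isChain_append]
    refine ⟨chain'_of_not_space _ (space_not_mem_toChars n), by decide, ?_⟩
    intro x hx y _ hsp
    exact absurd (hsp ▸ List.mem_of_mem_getLast? hx) (space_not_mem_toChars n)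
  · intro x hx y _ hsp
    have hq : x = '"' := by
      have h2 : ("<text:s text:c=\"".toList).getLast? = some '"' := by decide
      rw [h2] at hx
      have hx2 : '"' = x := by simpa using hx
      exact hx2.symm
    simp [hq] at hsp

theorem pvTag_head (n : Nat) : (pvTagB n).head? = some '<' := by
  rw [pvTagB, List.append_assoc, List.head?_append]
  have h1 : ("<text:s text:c=\"".toList).head? = some '<' := by decide
  rw [h1]; rfl

theorem pvTag_last (n : Nat) : (pvTagB n).getLast? = some '>' := by
  rw [pvTagB, List.append_assoc, List.getLast?_append_of_ne_nil _ (by simp),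
    List.getLast?_append_of_ne_nil _ (by decide)]
  decide

theorem pvTag_ne_nil (n : Nat) : pvTagB n ≠ [] := by
  rw [pvTagB]
  simp

-- getD through an append at an exact offset
theorem getD_append_len (u w : List Char) (k : Nat) (d : Char) :
    (u ++ w).getD (u.length + k) d = w.getD k d := by
  simp [List.getD, List.getElem?_append_right (Nat.le_add_right _ _)]

theorem takeWhile_rep (k : Nat) (v : List Char) (hv : v.head? ≠ some ' ') :
    (List.replicate k ' ' ++ v).takeWhile (fun c => c = ' ') = List.replicate k ' ' := by
  induction k with
  | zero =>
    cases v with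
    | nil => simp
    | cons x v => simp at hv ⊢; simp [List.takeWhile_cons, hv]
  | succ k ih => simp [List.replicate_succ, List.takeWhile_cons, ih]

theorem drop_rep (k : Nat) (v : List Char) : (List.replicate k ' ' ++ v).drop k = v := by
  have h := @List.drop_left Char (List.replicate k ' ') v
  simpa using h

-- runsB on a non-space head
theorem runsB_cons_ne (f : Bool) (x : Char) (l : List Char) (hx : x ≠ ' ') :
    runsB f (x :: l) = x :: runsB false l := by
  rw [runsB, if_neg hx]

-- runsB on a maximal space run of length ≥ 2
theorem runsB_run_ge2 (f : Bool) (c : Nat) (v : List Char) (hc : 2 ≤ c) (hv : v.head? ≠ some ' ') :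
    runsB f (List.replicate c ' ' ++ v) = pvTagB c ++ runsB false v := by
  obtain ⟨c', rfl⟩ : ∃ c', c = c' + 1 := ⟨c - 1, by omega⟩
  have hrep : List.replicate (c' + 1) ' ' ++ v = ' ' :: (List.replicate c' ' ' ++ v) := by
    simp [List.replicate_succ]
  rw [hrep, runsB, if_pos rfl, takeWhile_rep c' v hv, List.length_replicate, drop_rep,
    if_pos (by omega : 0 < c')]

-- runsB on a single maximal space
theorem runsB_run_1 (f : Bool) (v : List Char) (hv : v.head? ≠ some ' ') :
    runsB f (List.replicate 1 ' ' ++ v) =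
      (if f then "<text:s/>".toList else [' ']) ++ runsB false v := by
  have hrep : List.replicate 1 ' ' ++ v = ' ' :: (List.replicate 0 ' ' ++ v) := by
    simp [List.replicate_succ]
  rw [hrep, runsB, if_pos rfl, takeWhile_rep 0 v hv]
  simp

-- a clean already-processed prefix passes through runsB unchanged
theorem pvPass : ∀ (u v : List Char), List.IsChain (fun x y => x = ' ' → y ≠ ' ') u →
    u.getLast? ≠ some ' ' → runsB false (u ++ v) = u ++ runsB false v := by
  intro u
  induction u with
  | nil => intro v _ _; simp
  | cons a u ih =>
    intro v hch hlast
    rw [List.isChain_cons] at hch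
    by_cases ha : a = ' '
    · subst ha
      have hu : u ≠ [] := by
        intro h; subst h; simp at hlast
      obtain ⟨b, u', rfl⟩ : ∃ b u', u = b :: u' := by
        cases u with
        | nil => exact absurd rfl hu
        | cons b u' => exact ⟨b, u', rfl⟩
      have hb : b ≠ ' ' := hch.1 b (by simp) rfl
      have hlast' : (b :: u').getLast? ≠ some ' ' := by
        rwa [getLast?_cons_ne _ _ (by simp)] at hlast
      simp only [List.cons_append]
      rw [runsB, if_pos rfl]
      have ht : List.takeWhile (fun c => decide (c = ' ')) (b :: (u' ++ v)) = [] := by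
        simp [hb]
      rw [ht]
      simp only [List.length_nil, List.drop_zero, if_neg (lt_irrefl 0)]
      have ih' := ih v hch.2 hlast'
      rw [List.cons_append] at ih'
      rw [ih']
      simp
    · rw [List.cons_append, runsB_cons_ne _ _ _ ha]
      have hl : u.getLast? ≠ some ' ' := by
        cases u with
        | nil => simp
        | cons b u' => rwa [getLast?_cons_ne _ _ (by simp)] at hlast
      rw [ih v hch.2 hl]
      simp

-- pvSkipB computed as a takeWhile length
theorem pvSkipB_eq (s : List Char) : ∀ n i, s.length - i ≤ n →
    pvSkipB s i = i + ((s.drop i).takeWhile (fun c => c = ' ')).length := by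
  intro n
  induction n with
  | zero =>
    intro i hi
    rw [pvSkipB, dif_neg (by omega)]
    rw [List.drop_eq_nil_of_le (by omega)]
    simp
  | succ n ih =>
    intro i hi
    rw [pvSkipB]
    split
    · rename_i h
      rw [ih (i + 1) (by omega)]
      have hgd : s[i] = ' ' := by
        have := h.2
        rwa [List.getD, List.getElem?_eq_getElem h.1, Option.getD_some] at this
      rw [List.drop_eq_getElem_cons h.1, List.takeWhile_cons, hgd]
      simp
      omega
    · rename_i h
      by_cases hlen : i < s.length
      · have hgd : s[i] ≠ ' ' := by
          intro hx
          exact h ⟨hlen, by rw [List.getD, List.getElem?_eq_getElem hlen, Option.getD_some, hx]⟩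
        rw [List.drop_eq_getElem_cons hlen, List.takeWhile_cons]
        simp [hgd]
      · rw [List.drop_eq_nil_of_le (by omega)]
        simp

-- B's loop against the normal form
theorem pvLoopB_eq (s : List Char) : ∀ n i out, s.length - i ≤ n →
    pvLoopB s i out = out ++ runsB (i == 0) (s.drop i) := by
  intro n
  induction n with
  | zero =>
    intro i out hi
    rw [pvLoopB, dif_neg (by omega), List.drop_eq_nil_of_le (by omega), runsB]
    simp
  | succ n ih =>
    intro i out hi
    rw [pvLoopB]
    by_cases hlen : i < s.length
    · rw [dif_pos hlen]
      have hget : s.getD i ' ' = s[i] := by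
        rw [List.getD, List.getElem?_eq_getElem hlen, Option.getD_some]
      by_cases hsp : s.getD i ' ' = ' '
      · rw [dif_pos hsp]
        have hj := pvSkipB_eq s (s.length - i) i le_rfl
        have hsi : s[i] = ' ' := by rw [← hget, hsp]
        have htw : (s.drop i).takeWhile (fun c => c = ' ') =
            ' ' :: ((s.drop (i + 1)).takeWhile (fun c => c = ' ')) := by
          rw [List.drop_eq_getElem_cons hlen, List.takeWhile_cons, hsi]
          simp
        set t := ((s.drop (i + 1)).takeWhile (fun c => c = ' ')).length with ht
        have hj2 : pvSkipB s i = i + 1 + t := by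
          rw [hj, htw]; try simp [ht]; try omega
        have hlt : i < pvSkipB s i := pvSkipB_lt s i hlen hsp
        rw [ih (pvSkipB s i) _ (by omega)]
        have hbeq : (pvSkipB s i == 0) = false := by
          simp; omega
        rw [hbeq]
        have hdropj : s.drop (pvSkipB s i) = (s.drop (i + 1)).drop t := by
          rw [List.drop_drop, hj2]; try ring_nf
        rw [hdropj]
        -- unfold runsB on the right
        rw [List.drop_eq_getElem_cons hlen, hsi, runsB, if_pos rfl]
        rw [List.append_assoc]
        congr 1
        have hrun : pvSkipB s i - i = t + 1 := by omega
        rw [hrun, ← ht]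
        congr 1
        by_cases h0t : 0 < t
        · rw [if_pos (by omega : 1 < t + 1), if_pos h0t]
        · rw [if_neg (by omega : ¬ 1 < t + 1), if_neg h0t]
          by_cases hi0 : i = 0
          · rw [if_pos hi0, if_pos (by simp [hi0] : (i == 0) = true)]
          · have hb0 : ¬ ((i == 0) = true) := by simp [hi0]
            rw [if_neg hi0, if_neg hb0]
      · rw [dif_neg hsp]
        rw [ih (i + 1) _ (by omega)]
        have hbeq : (i + 1 == 0) = false := by simp
        rw [hbeq]
        rw [List.drop_eq_getElem_cons hlen, runsB_cons_ne _ _ _ (by rw [← hget]; exact hsp)]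
        rw [hget, List.append_assoc]
        rfl
    · rw [dif_neg hlen, List.drop_eq_nil_of_le (by omega), runsB]
      simp

-- the main invariant lemma: A's loop, from any reachable state, computes the normal form
theorem pvScan : ∀ (fuel K : Nat) (u v : List Char) (c b : Nat),
    (c = 0 ∨ b = u.length) →
    List.IsChain (fun x y => x = ' ' → y ≠ ' ') u →
    u.getLast? ≠ some ' ' →
    u.head? ≠ some ' ' →
    v.getLast? ≠ some ' ' →
    (v = [] → c = 0) →
    (u ++ List.replicate c ' ' ++ v).length + 20 + 20 * (u ++ List.replicate c ' ' ++ v).count ' ' ≤ K →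
    (u ++ List.replicate c ' ' ++ v).count ' ' * K +
      ((u ++ List.replicate c ' ' ++ v).length + 1 - (u.length + c)) ≤ fuel →
    pvLoopA fuel (u ++ List.replicate c ' ' ++ v) (u.length + c) c b =
      u ++ runsB u.isEmpty (List.replicate c ' ' ++ v) := by
  intro fuel
  induction fuel with
  | zero =>
    intro K u v c b hb hch hul huh hvl hve hK hfuel
    exfalso
    have hlen : (u ++ List.replicate c ' ' ++ v).length = u.length + c + v.length := by
      simp; omega
    omega
  | succ fuel ih =>
    intro K u v c b hb hch hul huh hvl hve hK hfuel
    have hlen : (u ++ List.replicate c ' ' ++ v).length = u.length + c + v.length := by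
      simp; omega
    have hcnt : (u ++ List.replicate c ' ' ++ v).count ' ' = u.count ' ' + c + v.count ' ' := by
      simp [List.count_append]; omega
    cases v with
    | nil =>
      have hc0 : c = 0 := hve rfl
      subst hc0
      rw [pvLoopA, if_neg (by simp)]
      simp [runsB]
    | cons x v' =>
      have hi : u.length + c < (u ++ List.replicate c ' ' ++ (x :: v')).length := by
        rw [hlen]; simp
      have hgd : (u ++ List.replicate c ' ' ++ (x :: v')).getD (u.length + c) ' ' = x := by
        have h2 : u.length + c = (u ++ List.replicate c ' ').length + 0 := by simp
        rw [h2, getD_append_len]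
        rfl
      by_cases hx : x = ' '
      · -- the scanned character is a space: the run grows by one
        rw [pvLoopA, if_pos hi, if_pos (by rw [hgd, hx])]
        have hv'ne : v' ≠ [] := by
          intro h; subst h; rw [hx] at hvl; simp at hvl
        have hvl' : v'.getLast? ≠ some ' ' := by
          rwa [getLast?_cons_ne _ _ hv'ne] at hvl
        have hre2 : List.replicate c ' ' ++ (x :: v') = List.replicate (c + 1) ' ' ++ v' := by
          rw [hx, List.replicate_succ', List.append_assoc]
          rfl
        have hb' : c + 1 = 0 ∨ (if c = 0 then u.length + c else b) = u.length := by
          right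
          by_cases hc0 : c = 0
          · simp [hc0]
          · rw [if_neg hc0]
            exact hb.resolve_left hc0
        have hre3 : u ++ List.replicate (c + 1) ' ' ++ v' = u ++ List.replicate c ' ' ++ (x :: v') := by
          rw [hx, List.replicate_succ']
          simp [List.append_assoc]
        have ihh := ih K u v' (c + 1) (if c = 0 then u.length + c else b) hb' hch hul huh
          hvl' (fun h => absurd h hv'ne) ?_ ?_
        · have hidx : u.length + (c + 1) = u.length + c + 1 := by omega
          rw [hidx, hre3, ← hre2] at ihh
          exact ihh
        · rw [hre3]
          exact hK
        · rw [hre3]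
          omega
      · -- the scanned character ends the current run
        rw [pvLoopA, if_pos hi, if_neg (by rw [hgd]; exact hx)]
        -- A's restart after a splice, reused by both replacement branches
        have cor : ∀ (ch0 : Char) (rest : List Char) (b' : Nat), ch0 ≠ ' ' →
            rest.getLast? ≠ some ' ' →
            (ch0 :: rest).length + 20 + 20 * (ch0 :: rest).count ' ' ≤ K →
            (ch0 :: rest).count ' ' * K + (ch0 :: rest).length ≤ fuel →
            pvLoopA fuel (ch0 :: rest) 1 0 b' = ch0 :: runsB false rest := by
          intro ch0 rest b' h1 h2 h3 h4
          have hcr : (ch0 :: rest).count ' ' = rest.count ' ' := by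
            rw [List.count_cons]
            simp [h1]
          have hcrK : (ch0 :: rest).count ' ' * K = rest.count ' ' * K := by rw [hcr]
          have hlr : (ch0 :: rest).length = rest.length + 1 := by simp
          have h5 := ih K [ch0] rest 0 b' (Or.inl rfl) (by simp) (by simp [h1]) (by simp [h1])
            h2 (fun _ => rfl)
            (by simp only [List.nil_append, List.replicate_zero, List.singleton_append]; omega)
            (by simp only [List.nil_append, List.replicate_zero, List.singleton_append,
                  List.length_cons]; omega)
          simpa using h5
        by_cases hc2 : 1 < c
        · -- counter > 1: splice in the counted tag and restart
          rw [if_pos hc2]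
          have hbu : b = u.length := hb.resolve_left (by omega)
          subst hbu
          have htake : (u ++ List.replicate c ' ' ++ (x :: v')).take u.length = u := by
            rw [List.append_assoc]
            exact List.take_left
          have hdrop : (u ++ List.replicate c ' ' ++ (x :: v')).drop (u.length + c) = x :: v' := by
            have h2 : u.length + c = (u ++ List.replicate c ' ').length := by simp
            rw [h2, List.drop_left]
          rw [htake, hdrop]
          have hmne : u ++ pvTagA c ≠ [] := by
            intro h
            exact pvTag_ne_nil c ((List.append_eq_nil_iff.mp h).2)
          obtain ⟨ch0, m', hm⟩ := List.exists_cons_of_ne_nil hmne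
          have hch0 : ch0 ≠ ' ' := by
            have hh : (u ++ pvTagA c).head? ≠ some ' ' := by
              rw [List.head?_append]
              cases u with
              | nil => simp [pvTagA_eq, pvTag_head]
              | cons a t => simpa using huh
            rw [hm] at hh
            simpa using hh
          have hrest : (m' ++ (x :: v')).getLast? ≠ some ' ' := by
            rw [List.getLast?_append_of_ne_nil _ (by simp)]
            exact hvl
          have hLlen : (ch0 :: (m' ++ (x :: v'))).length =
              u.length + (pvTagA c).length + (1 + v'.length) := by
            rw [← List.cons_append, ← hm]
            simp
            omega
          have hLcnt : (ch0 :: (m' ++ (x :: v'))).count ' ' =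
              u.count ' ' + 1 + (x :: v').count ' ' := by
            rw [← List.cons_append, ← hm]
            simp [List.count_append, pvTagA_eq, pvTag_count]
            omega
          have htaglen : (pvTagA c).length ≤ 19 + c := by
            rw [pvTagA_eq]; exact pvTag_len_le c (by omega)
          have hcntv : (x :: v').count ' ' = v'.count ' ' := by
            simp [List.count_cons, hx]
          have hxvlen : (x :: v').length = v'.length + 1 := by simp
          have e1 : (u ++ List.replicate c ' ' ++ (x :: v')).count ' ' =
              (ch0 :: (m' ++ (x :: v'))).count ' ' + (c - 1) := by
            rw [hcnt, hLcnt]; omega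
          have e2 : (u ++ List.replicate c ' ' ++ (x :: v')).count ' ' * K =
              (ch0 :: (m' ++ (x :: v'))).count ' ' * K + (c - 1) * K := by
            rw [e1, Nat.add_mul]
          have e3 : K ≤ (c - 1) * K := Nat.le_mul_of_pos_left K (by omega)
          have hsplit : (u ++ pvTagA c) ++ (x :: v') = ch0 :: (m' ++ (x :: v')) := by
            rw [hm, List.cons_append]
          rw [hsplit, cor ch0 (m' ++ (x :: v')) u.length hch0 hrest (by omega) (by omega)]
          have hchm : List.IsChain (fun p q => p = ' ' → q ≠ ' ') (u ++ pvTagA c) := by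
            rw [List.isChain_append]
            refine ⟨hch, by rw [pvTagA_eq]; exact pvTag_chain c, ?_⟩
            intro p hp q hq hsp
            rw [hsp] at hp
            exact ((hul (Option.mem_def.mp hp)).elim : q ≠ ' ')
          have hchm' : List.IsChain (fun p q => p = ' ' → q ≠ ' ') m' := by
            rw [hm] at hchm
            exact (List.isChain_cons.mp hchm).2
          have hm'last : m'.getLast? ≠ some ' ' := by
            cases hm'e : m' with
            | nil => simp
            | cons y t =>
              have : (u ++ pvTagA c).getLast? = some '>' := by
                have h9 : (pvTagA c).getLast? = some '>' := by
                  rw [pvTagA_eq]; exact pvTag_last c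
                rw [List.getLast?_append_of_ne_nil _ (by rw [pvTagA_eq]; exact pvTag_ne_nil c), h9]
              rw [hm, hm'e, getLast?_cons_ne _ _ (by simp)] at this
              rw [this]
              simp
          rw [pvPass m' (x :: v') hchm' hm'last]
          rw [runsB_run_ge2 u.isEmpty c (x :: v') (by omega) (by simp [hx])]
          rw [← List.cons_append, ← hm, ← pvTagA_eq]
          simp [List.append_assoc]
        · rw [if_neg hc2]
          by_cases hcb : 0 < c ∧ b = 0
          · -- a single leading space: splice in '<text:s/>' and restart
            rw [if_pos hcb]
            have hc1 : c = 1 := by omega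
            have hu0 : u = [] := by
              rcases hb with hb0 | hbu
              · omega
              · rw [← List.length_eq_zero_iff, ← hbu]
                exact hcb.2
            subst hc1
            subst hu0
            have hb0 : b = 0 := hcb.2
            subst hb0
            have htake : (([] : List Char) ++ List.replicate 1 ' ' ++ (x :: v')).take 0 = [] := by
              simp
            have hdrop : (([] : List Char) ++ List.replicate 1 ' ' ++ (x :: v')).drop (0 + 1) =
                x :: v' := by
              simp
            rw [htake, hdrop]
            have hnil0 : List.count ' ' ([] : List Char) = 0 := rfl
            have hnil1 : ([] : List Char).length = 0 := rfl
            have hsT : "<text:s/>".toList = '<' :: "text:s/>".toList := by decide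
            have hsplit : ([] : List Char) ++ "<text:s/>".toList ++ (x :: v') =
                '<' :: ("text:s/>".toList ++ (x :: v')) := by
              rw [List.nil_append, hsT]
              rfl
            have hrest : ("text:s/>".toList ++ (x :: v')).getLast? ≠ some ' ' := by
              rw [List.getLast?_append_of_ne_nil _ (by simp)]
              exact hvl
            have hLlen : ('<' :: ("text:s/>".toList ++ (x :: v'))).length = 9 + (1 + v'.length) := by
              simp
              omega
            have hLcnt : ('<' :: ("text:s/>".toList ++ (x :: v'))).count ' ' =
                (x :: v').count ' ' := by
              simp [List.count_append]
              try decide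
              try omega
            have hcntv : (x :: v').count ' ' = v'.count ' ' := by
              simp [List.count_cons, hx]
            have hxvlen : (x :: v').length = v'.length + 1 := by simp
            have e1 : (([] : List Char) ++ List.replicate 1 ' ' ++ (x :: v')).count ' ' =
                ('<' :: ("text:s/>".toList ++ (x :: v'))).count ' ' + 1 := by
              rw [hcnt, hLcnt]; omega
            have e2 : (([] : List Char) ++ List.replicate 1 ' ' ++ (x :: v')).count ' ' * K =
                ('<' :: ("text:s/>".toList ++ (x :: v'))).count ' ' * K + K := by
              rw [e1, Nat.add_mul, Nat.one_mul]
            have hfK : ('<' :: ("text:s/>".toList ++ (x :: v'))).length + 20 +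
                20 * ('<' :: ("text:s/>".toList ++ (x :: v'))).count ' ' ≤ K := by
              rw [hLlen, hLcnt]
              omega
            have hff : ('<' :: ("text:s/>".toList ++ (x :: v'))).count ' ' * K +
                ('<' :: ("text:s/>".toList ++ (x :: v'))).length ≤ fuel := by
              rw [hLlen]
              omega
            rw [hsplit, cor '<' ("text:s/>".toList ++ (x :: v')) 0 (by decide) hrest hfK hff]
            rw [pvPass "text:s/>".toList (x :: v') (by decide) (by decide)]
            rw [runsB_run_1 (List.isEmpty []) (x :: v') (by simp [hx])]
            simp [hsT]
          · -- no replacement: the run (if any) stays as a single interior space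
            rw [if_neg hcb]
            rcases Nat.lt_or_ge c 1 with hc0 | hc1ge
            · -- c = 0: consume one non-space character
              have hc0' : c = 0 := by omega
              subst hc0'
              have heq : (u ++ [x]) ++ List.replicate 0 ' ' ++ v' =
                  u ++ List.replicate 0 ' ' ++ (x :: v') := by
                simp
              have hchu' : List.IsChain (fun p q => p = ' ' → q ≠ ' ') (u ++ [x]) := by
                rw [List.isChain_append]
                refine ⟨hch, by simp, ?_⟩
                intro p hp q hq hsp
                simp at hq
                exact hq ▸ hx
              have hul' : (u ++ [x]).getLast? ≠ some ' ' := by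
                rw [List.getLast?_concat]
                simp [hx]
              have huh' : (u ++ [x]).head? ≠ some ' ' := by
                cases u with
                | nil => simp [hx]
                | cons a t => simpa using huh
              have hvl'' : v'.getLast? ≠ some ' ' := by
                cases hv'e : v' with
                | nil => simp
                | cons y t =>
                  rw [hv'e] at hvl
                  rwa [getLast?_cons_ne _ _ (by simp)] at hvl
              have ihh := ih K (u ++ [x]) v' 0 b (Or.inl rfl) hchu' hul' huh' hvl''
                (fun _ => rfl) ?_ ?_
              · have hidx : (u ++ [x]).length + 0 = u.length + 0 + 1 := by simp
                rw [heq, hidx] at ihh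
                rw [ihh]
                have hie : (u ++ [x]).isEmpty = false := by simp
                rw [hie]
                simp only [List.replicate_zero, List.nil_append]
                rw [runsB_cons_ne u.isEmpty x v' hx]
                simp
              · rw [heq]
                exact hK
              · rw [heq]
                have hlen2 : (u ++ [x]).length = u.length + 1 := by simp
                omega
            · -- c = 1, b = u.length ≠ 0: keep the single interior space
              have hc1 : c = 1 := by omega
              subst hc1
              have hbu : b = u.length := hb.resolve_left (by omega)
              have hune : u ≠ [] := by
                intro h
                subst h
                exact hcb ⟨by omega, by simpa using hbu⟩
              have heq : (u ++ [' ', x]) ++ List.replicate 0 ' ' ++ v' =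
                  u ++ List.replicate 1 ' ' ++ (x :: v') := by
                simp
              have hchu' : List.IsChain (fun p q => p = ' ' → q ≠ ' ') (u ++ [' ', x]) := by
                rw [List.isChain_append]
                refine ⟨hch, ?_, ?_⟩
                · rw [List.isChain_cons]
                  refine ⟨?_, by simp⟩
                  intro q hq _
                  simp at hq
                  exact hq ▸ hx
                · intro p hp q hq hsp
                  rw [hsp] at hp
                  exact absurd (Option.mem_def.mp hp) hul
              have hul' : (u ++ [' ', x]).getLast? ≠ some ' ' := by
                have h2 : u ++ [' ', x] = (u ++ [' ']) ++ [x] := by simp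
                rw [h2, List.getLast?_concat]
                simp [hx]
              have huh' : (u ++ [' ', x]).head? ≠ some ' ' := by
                cases u with
                | nil => exact absurd rfl hune
                | cons a t => simpa using huh
              have hvl'' : v'.getLast? ≠ some ' ' := by
                cases hv'e : v' with
                | nil => simp
                | cons y t =>
                  rw [hv'e] at hvl
                  rwa [getLast?_cons_ne _ _ (by simp)] at hvl
              have ihh := ih K (u ++ [' ', x]) v' 0 b (Or.inl rfl) hchu' hul' huh' hvl''
                (fun _ => rfl) ?_ ?_
              · have hidx : (u ++ [' ', x]).length + 0 = u.length + 1 + 1 := by simp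
                rw [heq, hidx] at ihh
                rw [ihh]
                have hie : (u ++ [' ', x]).isEmpty = false := by simp
                rw [hie]
                rw [runsB_run_1 u.isEmpty (x :: v') (by simp [hx])]
                have hie2 : u.isEmpty = false := by simp [hune]
                rw [hie2]
                rw [runsB_cons_ne false x v' hx]
                simp
              · rw [heq]
                exact hK
              · rw [heq]
                have hlen2 : (u ++ [' ', x]).length = u.length + 2 := by simp
                omega

theorem head?_dropWhile_ne (p : Char → Bool) (a : Char) (ha : p a = true) :
    ∀ l : List Char, (l.dropWhile p).head? ≠ some a := by
  intro l
  induction l with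
  | nil => simp
  | cons x l ih =>
    rw [List.dropWhile_cons]
    split
    · exact ih
    · rename_i h
      intro hx
      simp at hx
      rw [hx] at h
      exact h ha

theorem rstrip_last (l : List Char) : (PySem.Chars.rstrip l).getLast? ≠ some ' ' := by
  rw [PySem.Chars.rstrip, List.getLast?_reverse]
  exact head?_dropWhile_ne _ _ (by decide) _

-- ===== VERDICT (by name: the statement is the Claim_ definition above) =====
theorem save_spacing_spec : Claim_equal_save_spacing := by
  unfold Claim_equal_save_spacing Spec_save_spacing
  intro line _
  show save_spacing line = save_spacing_alt line
  unfold save_spacing save_spacing_alt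
  have hlast : ((PySem.Str.rstrip line).toList).getLast? ≠ some ' ' := by
    rw [PySem.Str.toList_rstrip]
    exact rstrip_last _
  have hA := pvScan (pvFuelA (PySem.Str.rstrip line).toList)
    ((PySem.Str.rstrip line).toList.length + 20 + 20 * (PySem.Str.rstrip line).toList.count ' ')
    [] (PySem.Str.rstrip line).toList 0 0 (Or.inl rfl) List.IsChain.nil (by simp) (by simp)
    hlast (fun _ => rfl) (by simp) (by rw [pvFuelA]; simp; omega)
  simp only [List.nil_append, List.replicate_zero, List.length_nil, List.isEmpty_nil,
    Nat.add_zero, Nat.zero_add] at hA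
  have hB := pvLoopB_eq (PySem.Str.rstrip line).toList
    ((PySem.Str.rstrip line).toList.length) 0 [] (by omega)
  simp only [List.nil_append, List.drop_zero] at hB
  show String.mk (pvLoopA (pvFuelA (PySem.Str.rstrip line).toList) (PySem.Str.rstrip line).toList 0 0 0)
      = String.mk (pvLoopB (PySem.Str.rstrip line).toList 0 [])
  rw [hA, hB]
  rfl
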